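-- pv_equiv track=rewrite | github.com/alex-dinh/leetcode | OA/MaximumUnits.py | getMaxUnits
-- ===== SOURCE A (Python) =====
-- from typing import List
-- import heapq
--
-- def getMaxUnits(boxes: List[int], unitsPerBox: List[int], truckSize: int) -> int:
--     '''
--     :param boxes: list, # of available boxes for each product i
--     :param unitsPerBox: list, # of units in each box of specified product i
--     :param truckSize: int, capacity of truck in # of boxes
--     :return: maximum number of units that can be shipped
--     '''
--
--     # build a maxheap
--     # IMPORTANT NOTE: heapify() is O(n), because it takes a different amount of time for each node
--     heap = []
--     for i in range(len(boxes)): # O(n)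
--         units_per_box = unitsPerBox[i]
--         # by default python heapq is a minheap, so negate values to sim a maxheap,
--         # most negative nums at top of heap
--         #   heapq is sorted by first item in pair, the num of units
--         heapq.heappush(heap, (-units_per_box, boxes[i]))
--
--     res = 0
--
--     # "adding" boxes to the truck
--     # get the box with most units from heap, calculate how many units can be shipped
--     # taking min() is faster than iterating 1 by 1, reduces number of iterations in loop
--     while truckSize > 0 and heap: # O(t), t = truck size
--         curr_max = heapq.heappop(heap) # O(log n), n is
--         max_boxes = min(truckSize, curr_max[1]) # while min() is typically O(n), n always == 2, so O(1) in this context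
--         truckSize -= max_boxes
--         res += max_boxes * (curr_max[0] * -1)
--
--     # FINAL TIME COMPLEXITY: O(T LOG N), T is truckSize, N is size of boxes[]
--     return res
-- ===== SOURCE B (Python) =====
-- def getMaxUnits(boxes, unitsPerBox, truckSize):
--     # sort-and-scan instead of a heap: sort (-units, count) pairs ascending, single pass
--     pairs = sorted([(-unitsPerBox[i], boxes[i]) for i in range(len(boxes))])
--     res = 0
--     for neg_units, count in pairs:
--         if truckSize <= 0:
--             break
--         take = min(truckSize, count)
--         truckSize -= take
--         res -= neg_units * take
--     return res
-- ===== Notes on version B (the rewrite author's own statement) =====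
-- stated objective: simpler
-- what changed: Replaces the heap build and pop-one-at-a-time while-loop with a single sorted() of the (-units, count) pairs followed by one flat scan with an early break.
import Mathlib
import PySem

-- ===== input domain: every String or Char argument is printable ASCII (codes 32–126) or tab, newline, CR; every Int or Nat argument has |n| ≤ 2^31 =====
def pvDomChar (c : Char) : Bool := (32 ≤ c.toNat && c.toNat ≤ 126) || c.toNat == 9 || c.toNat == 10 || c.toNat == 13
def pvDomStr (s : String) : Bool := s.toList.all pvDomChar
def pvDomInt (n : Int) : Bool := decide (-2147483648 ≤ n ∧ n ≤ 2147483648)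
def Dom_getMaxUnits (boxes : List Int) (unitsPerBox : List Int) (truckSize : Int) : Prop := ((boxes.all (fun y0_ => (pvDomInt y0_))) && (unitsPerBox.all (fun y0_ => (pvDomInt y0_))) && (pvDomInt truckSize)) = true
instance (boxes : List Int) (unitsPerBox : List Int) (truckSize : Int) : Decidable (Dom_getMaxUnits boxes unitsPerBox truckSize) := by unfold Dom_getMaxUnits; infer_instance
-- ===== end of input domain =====

-- B replaces A's heap (build + pop-loop) by one sort of the (-units, count) pairs and a single
-- flat scan with an early break; same return value, no speed claim ("simpler").
-- Pre_ excludes only inputs where A raises IndexError (unitsPerBox shorter than boxes); B raises there too.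

-- ===== PORT A =====
-- Heap elements are Python tuples (-units, count): Lex (Int × Int) is exactly Python's tuple order.
abbrev HE : Type := Lex (Int × Int)

def hpDflt : HE := toLex (0, 0)

-- CPython heapq._siftdown(heap, 0, pos) sifting `item` toward the root; transliteration
-- (CPython shifts each greater parent down and writes `item` once at the final hole — same writes).
theorem pvParentLt (pos : Nat) (h : 0 < pos) : (pos - 1) / 2 < pos :=
  Nat.lt_of_le_of_lt (Nat.div_le_self _ _) (Nat.sub_lt h Nat.one_pos)

def hpSiftdown (heap : List HE) (item : HE) (pos : Nat) : List HE :=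
  if h : 0 < pos then
    let parentpos := (pos - 1) / 2
    let parent := heap.getD parentpos hpDflt
    if item < parent then hpSiftdown (heap.set pos parent) item parentpos
    else heap.set pos item
  else heap.set pos item
termination_by pos
decreasing_by exact pvParentLt pos h

-- heapq.heappush
def hpPush (heap : List HE) (item : HE) : List HE :=
  hpSiftdown (heap ++ [item]) item heap.length

theorem pvSiftupDec (heap : List HE) (v : HE) (pos cp : Nat)
    (hcp : cp = 2 * pos + 2 ∨ cp = 2 * pos + 1) (hlt : cp < heap.length) :
    (heap.set pos v).length - cp < heap.length - pos := by
  simp only [List.length_set]; omega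

-- the child-descending while-loop of CPython heapq._siftup (moves the smaller child up, hole descends)
def hpSiftupLoop (heap : List HE) (pos : Nat) : List HE × Nat :=
  if h : 2 * pos + 1 < heap.length then
    let childpos :=
      if 2 * pos + 2 < heap.length ∧
          ¬ (heap.getD (2 * pos + 1) hpDflt < heap.getD (2 * pos + 2) hpDflt)
      then 2 * pos + 2 else 2 * pos + 1
    hpSiftupLoop (heap.set pos (heap.getD childpos hpDflt)) childpos
  else (heap, pos)
termination_by heap.length - pos
decreasing_by
  exact pvSiftupDec heap _ pos _
    (by split
        · exact Or.inl rfl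
        · exact Or.inr rfl)
    (by split
        · next hcond => exact hcond.1
        · exact h)

-- heapq._siftup(heap, 0): descend to a leaf, then sift `newitem` back toward the root
def hpSiftup (heap : List HE) (newitem : HE) : List HE :=
  match hpSiftupLoop heap 0 with
  | (h2, pos) => hpSiftdown h2 newitem pos

-- heapq.heappop: returns (popped min, remaining heap); getD defaults are never used on a nonempty heap
def hpPop (heap : List HE) : HE × List HE :=
  let lastelt := heap.getLast?.getD hpDflt
  let rest := heap.dropLast
  if rest.isEmpty then (lastelt, [])
  else (rest.getD 0 hpDflt, hpSiftup (rest.set 0 lastelt) lastelt)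

-- the while truckSize > 0 and heap: loop of A; the Nat argument is a fuel bound only
-- (each iteration pops one element, so heap.length fuel is never exhausted)
def aLoopF : Nat → List HE → Int → Int → Int
  | 0, _, _, res => res
  | fuel + 1, heap, truckSize, res =>
    if truckSize > 0 ∧ heap ≠ [] then
      let p := hpPop heap
      let maxBoxes := min truckSize (ofLex p.1).2
      aLoopF fuel p.2 (truckSize - maxBoxes) (res + maxBoxes * ((ofLex p.1).1 * (-1)))
    else res

def aLoop (heap : List HE) (truckSize : Int) (res : Int) : Int :=
  aLoopF heap.length heap truckSize res

def getMaxUnits (boxes : List Int) (unitsPerBox : List Int) (truckSize : Int) : Int :=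
  -- Pre_ guarantees every index is in range, so getD's default is never read
  let heap := (List.range boxes.length).foldl
    (fun h i => hpPush h (toLex (-(unitsPerBox.getD i 0), boxes.getD i 0))) []
  aLoop heap truckSize 0

-- ===== PORT B =====
-- the single for-loop with early break of B
def bLoop : List HE → Int → Int → Int
  | [], _, res => res
  | p :: rest, t, res =>
    if t ≤ 0 then res
    else bLoop rest (t - min t (ofLex p).2) (res - (ofLex p).1 * min t (ofLex p).2)

def getMaxUnits_alt (boxes : List Int) (unitsPerBox : List Int) (truckSize : Int) : Int :=
  let pairs := (List.range boxes.length).map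
    (fun i => (toLex (-(unitsPerBox.getD i 0), boxes.getD i 0) : HE))
  bLoop (PySem.List.sorted pairs (fun x => x) false) truckSize 0

-- ===== PRECONDITION & SPEC =====
-- Pre_ excludes exactly the inputs where A's `unitsPerBox[i]` raises IndexError (B raises identically).
def Pre_getMaxUnits (boxes : List Int) (unitsPerBox : List Int) (truckSize : Int) : Prop :=
  boxes.length ≤ unitsPerBox.length
instance (boxes : List Int) (unitsPerBox : List Int) (truckSize : Int) : Decidable (Pre_getMaxUnits boxes unitsPerBox truckSize) := by unfold Pre_getMaxUnits; infer_instance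

def pvWitness_getMaxUnits : List Int × List Int × Int := ([1, 3, 2], [3, 1, 2], 4)

def Spec_getMaxUnits (boxes : List Int) (unitsPerBox : List Int) (truckSize : Int) (out : Int) : Prop := out = getMaxUnits_alt boxes unitsPerBox truckSize
instance (boxes : List Int) (unitsPerBox : List Int) (truckSize : Int) (out : Int) : Decidable (Spec_getMaxUnits boxes unitsPerBox truckSize out) := by unfold Spec_getMaxUnits; infer_instance

-- ===== CLAIM (what is proved, stated in full; the proofs are below) =====
def Claim_equal_getMaxUnits : Prop := ∀ (boxes : List Int) (unitsPerBox : List Int) (truckSize : Int), Dom_getMaxUnits boxes unitsPerBox truckSize → Pre_getMaxUnits boxes unitsPerBox truckSize → Spec_getMaxUnits boxes unitsPerBox truckSize (getMaxUnits boxes unitsPerBox truckSize)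

-- ===== LEMMAS AND PROOFS =====

-- getD / set index bookkeeping
theorem pvGetD_set_self {α : Type} (l : List α) (i : Nat) (a d : α) (h : i < l.length) :
    (l.set i a).getD i d = a := by
  simp [List.getD_eq_getElem?_getD, List.getElem?_set_self h]

theorem pvGetD_set_ne {α : Type} (l : List α) (i j : Nat) (a d : α) (h : i ≠ j) :
    (l.set i a).getD j d = l.getD j d := by
  simp [List.getD_eq_getElem?_getD, List.getElem?_set_ne h]

theorem pvSet_getD_self {α : Type} (l : List α) (i : Nat) (d : α) (h : i < l.length) :
    l.set i (l.getD i d) = l := by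
  rw [List.getD_eq_getElem l d h]
  exact List.set_getElem_self h

theorem pvGetD_append_left {α : Type} (l t : List α) (j : Nat) (d : α) (h : j < l.length) :
    (l ++ t).getD j d = l.getD j d := by
  simp [List.getD_eq_getElem?_getD, List.getElem?_append_left h]

theorem pvMem_getD {α : Type} (l : List α) (j : Nat) (d : α) (h : j < l.length) :
    l.getD j d ∈ l := by
  rw [List.getD_eq_getElem l d h]; exact List.getElem_mem h

theorem pvMem_exists_getD {α : Type} {l : List α} {x : α} (d : α) (h : x ∈ l) :
    ∃ j, j < l.length ∧ l.getD j d = x := by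
  rcases List.mem_iff_getElem.mp h with ⟨j, hj, hx⟩
  exact ⟨j, hj, by rw [List.getD_eq_getElem l d hj]; exact hx⟩

-- swapping two positions is a permutation
theorem pvConsSetPerm {α : Type} : ∀ (l : List α) (k : Nat) (a b : α), k < l.length →
    (a :: l.set k b).Perm (b :: l.set k a)
  | [], k, a, b, h => by simp at h
  | y :: t, 0, a, b, h => by simpa using List.Perm.swap b a t
  | y :: t, k + 1, a, b, h => by
    have ih := pvConsSetPerm t k a b (by simp only [List.length_cons] at h; omega)
    exact ((List.Perm.swap y a _).trans (ih.cons y)).trans (List.Perm.swap b y _)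

theorem pvSetSetPerm {α : Type} : ∀ (l : List α) (i j : Nat) (a b : α), i < j → j < l.length →
    ((l.set i a).set j b).Perm ((l.set i b).set j a)
  | [], i, j, a, b, hij, hj => by simp at hj
  | x :: t, 0, j + 1, a, b, hij, hj => by
    simpa using pvConsSetPerm t j a b (by simp only [List.length_cons] at hj; omega)
  | x :: t, i + 1, j + 1, a, b, hij, hj => by
    simpa using (pvSetSetPerm t i j a b (by omega) (by simp only [List.length_cons] at hj; omega)).cons x

-- heap invariant: every non-root node is ≥ its parent
def InvP (l : List HE) : Prop :=
  ∀ j, j < l.length → 0 < j → l.getD ((j - 1) / 2) hpDflt ≤ l.getD j hpDflt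

-- invariant away from the hole `pos`
def SD1 (l : List HE) (pos : Nat) : Prop :=
  ∀ j, j < l.length → 0 < j → j ≠ pos → (j - 1) / 2 ≠ pos →
    l.getD ((j - 1) / 2) hpDflt ≤ l.getD j hpDflt

-- children of the hole dominate both `item` and the hole's parent
def SD2 (l : List HE) (item : HE) (pos : Nat) : Prop :=
  ∀ j, j < l.length → 0 < j → (j - 1) / 2 = pos →
    item ≤ l.getD j hpDflt ∧ (0 < pos → l.getD ((pos - 1) / 2) hpDflt ≤ l.getD j hpDflt)

-- children of the hole dominate the hole's parent
def SU2 (l : List HE) (pos : Nat) : Prop :=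
  ∀ j, j < l.length → 0 < j → (j - 1) / 2 = pos →
    (0 < pos → l.getD ((pos - 1) / 2) hpDflt ≤ l.getD j hpDflt)

theorem siftdown_spec : ∀ (pos : Nat) (l : List HE) (item : HE), pos < l.length →
    SD1 l pos → SD2 l item pos →
    InvP (hpSiftdown l item pos) ∧ (hpSiftdown l item pos).Perm (l.set pos item) := by
  intro pos
  induction pos using Nat.strong_induction_on with
  | _ pos IH =>
    intro l item hp h1 h2
    rw [hpSiftdown]
    by_cases hpos : 0 < pos
    · simp only [dif_pos hpos]
      set pp := (pos - 1) / 2 with hppdef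
      set parent := l.getD pp hpDflt with hpardef
      have hpppos : pp < pos := by omega
      by_cases hlt : item < parent
      · simp only [if_pos hlt]
        set l' := l.set pos parent with hl'def
        have hlen' : l'.length = l.length := by simp [hl'def]
        have hget' : ∀ j, j ≠ pos → l'.getD j hpDflt = l.getD j hpDflt := by
          intro j hj; rw [hl'def, pvGetD_set_ne _ _ _ _ _ (by omega)]
        have hgetpos : l'.getD pos hpDflt = parent := pvGetD_set_self _ _ _ _ hp
        have h1' : SD1 l' pp := by
          intro j hj hj0 hne hpne
          rw [hlen'] at hj
          by_cases hjpos : j = pos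
          · exact absurd (by omega : (j - 1) / 2 = pp) hpne
          · by_cases hjpar : (j - 1) / 2 = pos
            · have hjgt : pos < j := by omega
              rw [hget' j hjpos, hjpar, hgetpos]
              exact (h2 j hj hj0 hjpar).2 hpos
            · rw [hget' j hjpos, hget' _ hjpar]
              exact h1 j hj hj0 hjpos hjpar
        have h2' : SD2 l' item pp := by
          intro j hj hj0 hpj
          rw [hlen'] at hj
          have hppj : pp < j := by omega
          constructor
          · by_cases hjpos : j = pos
            · rw [hjpos, hgetpos]; exact le_of_lt hlt
            · rw [hget' j hjpos]
              have := h1 j hj hj0 hjpos (by omega)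
              rw [hpj] at this
              exact le_of_lt (lt_of_lt_of_le hlt this)
          · intro hpp0
            have hpppne : (pp - 1) / 2 ≠ pos := by omega
            rw [hget' _ hpppne]
            by_cases hjpos : j = pos
            · rw [hjpos, hgetpos, hpardef]
              exact h1 pp (by omega) hpp0 (by omega) (by omega)
            · rw [hget' j hjpos]
              have hstep1 : l.getD ((pp - 1) / 2) hpDflt ≤ l.getD pp hpDflt :=
                h1 pp (by omega) hpp0 (by omega) (by omega)
              have hstep2 : l.getD pp hpDflt ≤ l.getD j hpDflt := by
                have := h1 j hj hj0 hjpos (by omega)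
                rw [hpj] at this; exact this
              exact le_trans hstep1 hstep2
        obtain ⟨hinv, hperm⟩ := IH pp hpppos l' item (by omega) h1' h2'
        refine ⟨hinv, hperm.trans ?_⟩
        have hcomm : (l.set pos parent).set pp item = (l.set pp item).set pos parent :=
          List.set_comm _ _ (by omega)
        rw [hl'def, hcomm]
        have hswap := pvSetSetPerm l pp pos item parent hpppos hp
        have hfix : (l.set pp parent).set pos item = l.set pos item := by
          rw [hpardef, pvSet_getD_self l pp hpDflt (by omega)]
        rw [hfix] at hswap
        exact hswap
      · simp only [if_neg hlt]
        refine ⟨?_, List.Perm.refl _⟩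
        intro j hj hj0
        rw [List.length_set] at hj
        by_cases hjpos : j = pos
        · subst hjpos
          rw [pvGetD_set_self l j item hpDflt hp, pvGetD_set_ne l j ((j - 1) / 2) item hpDflt (by omega)]
          exact le_of_not_gt (by simpa using hlt)
        · by_cases hjpar : (j - 1) / 2 = pos
          · rw [hjpar, pvGetD_set_self l pos item hpDflt hp,
              pvGetD_set_ne l pos j item hpDflt (by omega)]
            exact (h2 j hj hj0 hjpar).1
          · rw [pvGetD_set_ne l pos j item hpDflt (by omega),
              pvGetD_set_ne l pos ((j - 1) / 2) item hpDflt (by omega)]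
            exact h1 j hj hj0 hjpos hjpar
    · simp only [dif_neg hpos]
      have hpos0 : pos = 0 := by omega
      subst hpos0
      refine ⟨?_, List.Perm.refl _⟩
      intro j hj hj0
      rw [List.length_set] at hj
      by_cases hjpar : (j - 1) / 2 = 0
      · rw [hjpar, pvGetD_set_self l 0 item hpDflt hp,
          pvGetD_set_ne l 0 j item hpDflt (by omega)]
        exact (h2 j hj hj0 hjpar).1
      · rw [pvGetD_set_ne l 0 j item hpDflt (by omega),
          pvGetD_set_ne l 0 ((j - 1) / 2) item hpDflt (by omega)]
        exact h1 j hj hj0 (by omega) hjpar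

theorem push_spec (l : List HE) (x : HE) (hinv : InvP l) :
    InvP (hpPush l x) ∧ (hpPush l x).Perm (x :: l) := by
  unfold hpPush
  have hp : l.length < (l ++ [x]).length := by simp
  have h1 : SD1 (l ++ [x]) l.length := by
    intro j hj hj0 hne hpne
    simp only [List.length_append, List.length_cons, List.length_nil] at hj
    have hjl : j < l.length := by omega
    have hpj : (j - 1) / 2 < l.length := by omega
    rw [pvGetD_append_left _ _ _ _ hpj, pvGetD_append_left _ _ _ _ hjl]
    exact hinv j hjl hj0
  have h2 : SD2 (l ++ [x]) x l.length := by
    intro j hj hj0 hpj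
    simp only [List.length_append, List.length_cons, List.length_nil] at hj
    omega
  obtain ⟨hi, hperm⟩ := siftdown_spec l.length (l ++ [x]) x hp h1 h2
  refine ⟨hi, hperm.trans ?_⟩
  have : (l ++ [x]).set l.length x = l ++ [x] := by simp
  rw [this]
  exact List.perm_append_singleton x l

theorem invP_min (l : List HE) (h : InvP l) :
    ∀ j, j < l.length → l.getD 0 hpDflt ≤ l.getD j hpDflt := by
  intro j
  induction j using Nat.strong_induction_on with
  | _ j IH =>
    intro hj
    by_cases hj0 : j = 0
    · subst hj0; exact le_refl _
    · exact le_trans (IH ((j - 1) / 2) (by omega) (by omega)) (h j hj (by omega))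

theorem siftupLoop_spec : ∀ (n : Nat) (l : List HE) (pos : Nat), l.length - pos ≤ n →
    pos < l.length → SD1 l pos → SU2 l pos →
    (hpSiftupLoop l pos).2 < (hpSiftupLoop l pos).1.length ∧
    (hpSiftupLoop l pos).1.length = l.length ∧
    SD1 (hpSiftupLoop l pos).1 (hpSiftupLoop l pos).2 ∧
    (hpSiftupLoop l pos).1.length ≤ 2 * (hpSiftupLoop l pos).2 + 1 ∧
    (∀ y, ((hpSiftupLoop l pos).1.set (hpSiftupLoop l pos).2 y).Perm (l.set pos y)) := by
  intro n
  induction n with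
  | zero =>
    intro l pos hfuel hp h1 h2
    exact absurd hp (by omega)
  | succ n IH =>
    intro l pos hfuel hp h1 h2
    rw [hpSiftupLoop]
    by_cases hc : 2 * pos + 1 < l.length
    · simp only [dif_pos hc]
      set cp := if 2 * pos + 2 < l.length ∧
          ¬ (l.getD (2 * pos + 1) hpDflt < l.getD (2 * pos + 2) hpDflt)
        then 2 * pos + 2 else 2 * pos + 1 with hcpdef
      have hcp_or : cp = 2 * pos + 1 ∨ cp = 2 * pos + 2 := by
        rw [hcpdef]; split <;> simp
      have hcplt : cp < l.length := by
        rw [hcpdef]; split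
        · omega
        · exact hc
      have hposcp : pos < cp := by omega
      have hsel : ∀ s, s < l.length → 0 < s → (s - 1) / 2 = pos → s ≠ cp →
          l.getD cp hpDflt ≤ l.getD s hpDflt := by
        intro s hs hs0 hspar hne
        have hs_or : s = 2 * pos + 1 ∨ s = 2 * pos + 2 := by omega
        rw [hcpdef]
        by_cases hcond : 2 * pos + 2 < l.length ∧
            ¬ (l.getD (2 * pos + 1) hpDflt < l.getD (2 * pos + 2) hpDflt)
        · simp only [if_pos hcond]
          have hseq : s = 2 * pos + 1 := by
            rcases hs_or with h | h
            · exact h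
            · exfalso; apply hne; rw [hcpdef, if_pos hcond]; omega
          rw [hseq]
          exact le_of_not_gt (by simpa using hcond.2)
        · simp only [if_neg hcond]
          have hseq : s = 2 * pos + 2 := by
            rcases hs_or with h | h
            · exfalso; apply hne; rw [hcpdef, if_neg hcond]; omega
            · exact h
          rw [hseq]
          rw [not_and_or, not_not] at hcond
          exact le_of_lt (hcond.resolve_left (by omega))
      set l' := l.set pos (l.getD cp hpDflt) with hl'def
      have hlen' : l'.length = l.length := by simp [hl'def]
      have hget' : ∀ j, j ≠ pos → l'.getD j hpDflt = l.getD j hpDflt := by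
        intro j hj; rw [hl'def, pvGetD_set_ne _ _ _ _ _ (by omega)]
      have hgetpos : l'.getD pos hpDflt = l.getD cp hpDflt :=
        pvGetD_set_self _ _ _ _ hp
      have h1' : SD1 l' cp := by
        intro j hj hj0 hne hpne
        rw [hlen'] at hj
        by_cases hjpos : j = pos
        · have hps : 0 < pos := by omega
          rw [hjpos, hget' ((pos - 1) / 2) (by omega), hgetpos]
          exact h2 cp hcplt (by omega) (by omega) hps
        · by_cases hjpar : (j - 1) / 2 = pos
          · rw [hget' j hjpos, hjpar, hgetpos]
            exact hsel j hj hj0 hjpar hne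
          · rw [hget' j hjpos, hget' _ hjpar]
            exact h1 j hj hj0 hjpos hjpar
      have h2' : SU2 l' cp := by
        intro j hj hj0 hpj _
        rw [hlen'] at hj
        have hjne : j ≠ pos := by omega
        have hcp_par : (cp - 1) / 2 = pos := by omega
        rw [hcp_par, hgetpos, hget' j hjne]
        have := h1 j hj hj0 (by omega) (by omega)
        rw [hpj] at this
        exact this
      have hfuel' : l'.length - cp ≤ n := by rw [hlen']; omega
      obtain ⟨g1, g2, g3, g4, g5⟩ := IH l' cp hfuel' (by omega) h1' h2'
      refine ⟨g1, by rw [g2, hlen'], g3, g4, ?_⟩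
      intro y
      refine (g5 y).trans ?_
      have hcomm : (l.set pos (l.getD cp hpDflt)).set cp y
          = (l.set cp y).set pos (l.getD cp hpDflt) := List.set_comm _ _ (by omega)
      have hswap := pvSetSetPerm l pos cp (l.getD cp hpDflt) y hposcp hcplt
      have hfix : (l.set pos y).set cp (l.getD cp hpDflt) = l.set pos y := by
        have : (l.set pos y).getD cp hpDflt = l.getD cp hpDflt :=
          pvGetD_set_ne _ _ _ _ _ (by omega)
        conv_lhs => rw [← this]
        exact pvSet_getD_self _ _ _ (by simp; omega)
      rw [hfix] at hswap
      exact hswap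
    · simp only [dif_neg hc]
      exact ⟨hp, by trivial, h1, by omega, fun y => List.Perm.refl _⟩

theorem pop_spec (l : List HE) (hne : l ≠ []) (hinv : InvP l) :
    (hpPop l).1 = l.getD 0 hpDflt ∧ InvP (hpPop l).2 ∧
    ((hpPop l).1 :: (hpPop l).2).Perm l := by
  obtain ⟨init, last, rfl⟩ : ∃ init last, l = init ++ [last] := by
    rcases List.eq_nil_or_concat l with h0 | ⟨init, last, h0⟩
    · exact absurd h0 hne
    · exact ⟨init, last, by simpa using h0⟩
  unfold hpPop
  have hlast : (init ++ [last]).getLast?.getD hpDflt = last := by simp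
  have hdrop : (init ++ [last]).dropLast = init := by simp
  rw [hlast, hdrop]
  by_cases hrest : init.isEmpty
  · simp only [if_pos hrest]
    have h0 : init = [] := by simpa [List.isEmpty_iff] using hrest
    subst h0
    refine ⟨by simp [List.getD_eq_getElem?_getD], ?_, by simp⟩
    intro j hj hj0; simp at hj
  · simp only [if_neg hrest]
    have hdne : init ≠ [] := by simpa [List.isEmpty_iff] using hrest
    have hdlen : 0 < init.length := List.length_pos_iff.mpr hdne
    have hlpos : 0 < (init ++ [last]).length := by simp
    obtain ⟨m, itail, rfl⟩ : ∃ m itail, init = m :: itail := by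
      cases init with
      | nil => exact absurd rfl hdne
      | cons a b => exact ⟨a, b, rfl⟩
    set l0 := (m :: itail).set 0 last with hl0def
    have hl0len : l0.length = itail.length + 1 := by simp [hl0def]
    have hllen : ((m :: itail) ++ [last]).length = itail.length + 2 := by simp
    have hgl0 : ∀ j, 0 < j → j < itail.length + 1 →
        l0.getD j hpDflt = ((m :: itail) ++ [last]).getD j hpDflt := by
      intro j hj0 hj
      rw [hl0def, pvGetD_set_ne _ _ _ _ _ (by omega)]
      exact (pvGetD_append_left (m :: itail) [last] j hpDflt (by simp; omega)).symm
    have h1 : SD1 l0 0 := by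
      intro j hj hj0 hne0 hpne
      rw [hl0len] at hj
      rw [hgl0 j hj0 hj, hgl0 ((j - 1) / 2) (by omega) (by omega)]
      exact hinv j (by omega) hj0
    have h2 : SU2 l0 0 := by
      intro j hj hj0 hpj h00
      exact absurd h00 (by omega)
    unfold hpSiftup
    rcases hev : hpSiftupLoop l0 0 with ⟨h2l, p2⟩
    have hspec := siftupLoop_spec l0.length l0 0 (by omega) (by omega) h1 h2
    rw [hev] at hspec
    dsimp only at hspec
    obtain ⟨g1, g2, g3, g4, g5⟩ := hspec
    have hsd2 : SD2 h2l last p2 := by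
      intro j hj hj0 hpj
      exact absurd hj (by omega)
    obtain ⟨hfi, hfperm⟩ := siftdown_spec p2 h2l last g1 g3 hsd2
    refine ⟨rfl, hfi, ?_⟩
    have hp1 : (hpSiftdown h2l last p2).Perm l0 := by
      refine hfperm.trans ?_
      have := g5 last
      have hl0set : l0.set 0 last = l0 := by rw [hl0def, List.set_set]
      rw [hl0set] at this
      exact this
    have hl0cons : l0 = last :: itail := by rw [hl0def]; rfl
    rw [hl0cons] at hp1
    exact (hp1.cons m).trans
      (((List.perm_append_singleton last itail).symm.cons m))

theorem foldl_push_spec : ∀ (xs acc : List HE), InvP acc →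
    InvP (xs.foldl hpPush acc) ∧ (xs.foldl hpPush acc).Perm (acc ++ xs)
  | [], acc, h => ⟨h, by simp⟩
  | x :: xs, acc, h => by
    obtain ⟨hpi, hpp⟩ := push_spec acc x h
    obtain ⟨hi, hp⟩ := foldl_push_spec xs (hpPush acc x) hpi
    refine ⟨by simpa using hi, ?_⟩
    simp only [List.foldl_cons]
    exact hp.trans ((hpp.append_right xs).trans
      (by simpa using (List.perm_middle (a := x) (l₁ := acc) (l₂ := xs)).symm))

theorem loop_eq : ∀ (n : Nat) (h : List HE), h.length ≤ n → InvP h →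
    ∀ (l : List HE) (t res : Int), h.Perm l → l.Pairwise (· ≤ ·) →
    aLoopF n h t res = bLoop l t res := by
  intro n
  induction n with
  | zero =>
    intro h hlen hinv l t res hperm hpw
    have h0 : h = [] := List.eq_nil_of_length_eq_zero (by omega)
    subst h0
    have l0 : l = [] := hperm.symm.eq_nil
    subst l0
    rw [aLoopF, bLoop]
  | succ n IH =>
    intro h hlen hinv l t res hperm hpw
    rw [aLoopF]
    by_cases hc : t > 0 ∧ h ≠ []
    · obtain ⟨ht, hne⟩ := hc
      simp only [if_pos (And.intro ht hne)]
      obtain ⟨hm, hinv', hperm'⟩ := pop_spec h hne hinv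
      have hlne : l ≠ [] := fun h0 => hne (by subst h0; exact hperm.eq_nil)
      obtain ⟨m', l', rfl⟩ : ∃ m' l', l = m' :: l' := by
        cases l with
        | nil => exact absurd rfl hlne
        | cons a b => exact ⟨a, b, rfl⟩
      have hlpos : 0 < h.length := List.length_pos_iff.mpr hne
      -- the popped element equals the sorted head
      have hmem_m : (hpPop h).1 ∈ h := by
        rw [hm]; exact pvMem_getD h 0 hpDflt hlpos
      have hm_in_l : (hpPop h).1 ∈ m' :: l' := hperm.mem_iff.mp hmem_m
      have hle1 : m' ≤ (hpPop h).1 := by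
        rcases List.mem_cons.mp hm_in_l with heq | hmem
        · exact le_of_eq heq.symm
        · exact (List.pairwise_cons.mp hpw).1 _ hmem
      have hle2 : (hpPop h).1 ≤ m' := by
        have hm'h : m' ∈ h := hperm.symm.mem_iff.mp (List.mem_cons_self)
        obtain ⟨j, hj, hjx⟩ := pvMem_exists_getD hpDflt hm'h
        rw [hm, ← hjx]
        exact invP_min h hinv j hj
      have hmeq : (hpPop h).1 = m' := le_antisymm hle2 hle1
      have hperm'' : (hpPop h).2.Perm l' :=
        List.Perm.cons_inv (hmeq ▸ (hperm'.trans hperm))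
      have hlen' : (hpPop h).2.length ≤ n := by
        have := hperm'.length_eq
        simp at this
        omega
      rw [bLoop, if_neg (by omega : ¬ t ≤ 0)]
      rw [hmeq]
      have hresq : res + min t (ofLex m').2 * ((ofLex m').1 * (-1))
          = res - (ofLex m').1 * min t (ofLex m').2 := by ring
      rw [hresq]
      exact IH (hpPop h).2 hlen' hinv' l' _ _ hperm'' (List.pairwise_cons.mp hpw).2
    · simp only [if_neg hc]
      rw [not_and_or] at hc
      by_cases hne : h = []
      · have l0 : l = [] := by subst hne; exact hperm.symm.eq_nil
        subst l0
        rw [bLoop]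
      · have ht : t ≤ 0 := by
          rcases hc with h1 | h1
          · omega
          · exact absurd (not_not.mp h1) hne
        cases l with
        | nil => rw [bLoop]
        | cons a b => rw [bLoop, if_pos ht]

theorem getMaxUnits_main : ∀ (boxes : List Int) (unitsPerBox : List Int) (truckSize : Int),
    getMaxUnits boxes unitsPerBox truckSize = getMaxUnits_alt boxes unitsPerBox truckSize := by
  intro boxes unitsPerBox truckSize
  unfold getMaxUnits getMaxUnits_alt
  set f : Nat → HE := fun i => (toLex (-(unitsPerBox.getD i 0), boxes.getD i 0) : HE) with hfdef
  set pairs := (List.range boxes.length).map f with hpairs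
  have hfold : (List.range boxes.length).foldl (fun h i => hpPush h (f i)) []
      = pairs.foldl hpPush [] := by
    rw [hpairs, List.foldl_map]
  rw [hfold]
  unfold aLoop
  obtain ⟨hinv, hperm⟩ := foldl_push_spec pairs [] (by intro j hj hj0; simp at hj)
  have hsp : (PySem.List.sorted pairs (fun x => x) false).Perm pairs :=
    PySem.List.sorted_perm pairs (fun x => x) false
  have hpw : (PySem.List.sorted pairs (fun x => x) false).Pairwise (· ≤ ·) := by
    have := PySem.List.sorted_pairwise pairs (fun x => x)
    simpa using this
  exact loop_eq (pairs.foldl hpPush []).length _ le_rfl hinv _ truckSize 0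
    ((hperm.trans (by simp)).trans hsp.symm) hpw

-- ===== VERDICT (by name: the statement is the Claim_ definition above) =====
theorem getMaxUnits_spec : Claim_equal_getMaxUnits := by
  intro boxes unitsPerBox truckSize _ _
  exact getMaxUnits_main boxes unitsPerBox truckSize
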